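-- pv_equiv track=rewrite | github.com/mingu-seo/coding_test | baekjoon/silver3/4779.py | func
-- ===== SOURCE A (Python) =====
-- def func(arr) :
--     size = len(arr) # 배열길이
--     if size <= 1:
--         return arr
--     term = size // 3
--     left = arr[0:term]
--     right = arr[-term-1:-1]
--     middle = [0]*term
--     # return left + middle + right
--     return func(left) + middle + func(right)
-- ===== SOURCE B (Python) =====
-- def func(arr):
--     # Iterative explicit-stack version: processes (kind, start, length) work items
--     # left-to-right into one output accumulator instead of recursive slicing.
--     out = []
--     stack = [(0, 0, len(arr))]  # kind 0 = segment of arr, kind 1 = zeros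
--     while stack:
--         kind, start, length = stack.pop()
--         if kind == 1:
--             out.extend([0] * length)
--         elif length <= 1:
--             out.extend(arr[start:start + length])
--         else:
--             t = length // 3
--             stack.append((0, start + length - t - 1, t))
--             stack.append((1, 0, t))
--             stack.append((0, start, t))
--     return out
-- ===== Notes on version B (the rewrite author's own statement) =====
-- stated objective: alternative
-- what changed: Replaces A's recursion (which materialises left/right sublist copies and concatenates three recursive results at every level) by an iterative explicit work-stack loop over (kind, start, length) descriptors that appends each emitted piece left-to-right onto a single output accumulator; only length-<=1 leaf slices of the input are ever materialised.
import Mathlib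
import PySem

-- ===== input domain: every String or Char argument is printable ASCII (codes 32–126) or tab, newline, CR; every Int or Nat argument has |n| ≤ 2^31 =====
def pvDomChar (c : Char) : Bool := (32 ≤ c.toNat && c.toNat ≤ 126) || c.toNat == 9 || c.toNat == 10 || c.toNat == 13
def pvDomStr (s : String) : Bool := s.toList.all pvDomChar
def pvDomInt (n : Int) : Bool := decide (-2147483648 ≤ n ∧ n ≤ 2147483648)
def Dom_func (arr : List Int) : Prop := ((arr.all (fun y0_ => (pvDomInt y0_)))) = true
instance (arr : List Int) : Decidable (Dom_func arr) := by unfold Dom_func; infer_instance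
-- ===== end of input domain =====

-- B replaces A's recursive slicing by an explicit work-stack loop that emits the
-- output left-to-right into a single accumulator (objective: alternative decomposition).


-- ===== PORT A =====
-- normal forms of A's two slices, cited by func's decreasing_by (termination only)
theorem sliceA_left (xs : List Int) :
    PySem.List.slice xs (some 0) (some (PySem.Int.floordiv (xs.length : Int) 3)) =
      xs.take (xs.length / 3) := by
  have h3 : PySem.Int.floordiv (xs.length : Int) 3 = ((xs.length / 3 : Nat) : Int) := by
    exact_mod_cast PySem.Int.floordiv_natCast xs.length 3
  rw [h3, PySem.List.slice_zero_start, PySem.List.slice_to_natCast]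

theorem sliceA_right (xs : List Int) (h : 2 ≤ xs.length) :
    PySem.List.slice xs (some (-(PySem.Int.floordiv (xs.length : Int) 3) - 1)) (some (-1)) =
      (xs.drop (xs.length - xs.length / 3 - 1)).take (xs.length / 3) := by
  have h3 : PySem.Int.floordiv (xs.length : Int) 3 = ((xs.length / 3 : Nat) : Int) := by
    exact_mod_cast PySem.Int.floordiv_natCast xs.length 3
  have hk : (0:Nat) < xs.length / 3 + 1 := by omega
  have ha : (-(PySem.Int.floordiv (xs.length : Int) 3) - 1)
      = -(((xs.length / 3 + 1 : Nat)) : Int) := by rw [h3]; push_cast; ring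
  have hb : ((-1 : Int)) = -(((1:Nat)) : Int) := by norm_num
  rw [ha, hb, PySem.List.slice]
  simp only [PySem.List.clampIdx_neg_natCast _ _ hk, PySem.List.clampIdx_neg_natCast _ 1 (by omega)]
  have hlt : xs.length / 3 < xs.length := by omega
  congr 1
  omega

def func (arr : List Int) : List Int :=
  let size : Int := (arr.length : Int)
  if size ≤ 1 then arr
  else
    let term := PySem.Int.floordiv size 3
    let left := PySem.List.slice arr (some 0) (some term)
    let right := PySem.List.slice arr (some (-term - 1)) (some (-1))
    let middle := List.replicate term.toNat 0
    func left ++ middle ++ func right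
termination_by arr.length
decreasing_by
  · rw [sliceA_left]
    simp only [List.length_take]
    omega
  · rw [sliceA_right arr (by omega)]
    simp only [List.length_take, List.length_drop]
    omega

-- ===== PORT B =====
-- measure for the work stack (termination only)
def bMeasure (it : Int × Int × Int) : Nat :=
  if it.1 = 1 then 1 else 6 * it.2.2.toNat + 2

-- the while-loop of Source B: stack head = top of the Python stack (last element)
def bLoop (arr : List Int) (stack : List (Int × Int × Int)) (out : List Int) : List Int :=
  match stack with
  | [] => out
  | (k, s, l) :: rest =>
    if k = 1 then bLoop arr rest (out ++ List.replicate l.toNat 0)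
    else if l ≤ 1 then bLoop arr rest (out ++ PySem.List.slice arr (some s) (some (s + l)))
    else
      let t := PySem.Int.floordiv l 3
      bLoop arr ((0, s, t) :: (1, 0, t) :: (0, s + l - t - 1, t) :: rest) out
termination_by (stack.map bMeasure).sum
decreasing_by
  · simp only [List.map_cons, List.sum_cons, bMeasure]
    split <;> omega
  · simp only [List.map_cons, List.sum_cons, bMeasure]
    split <;> omega
  · rename_i hk hl1
    simp only [List.map_cons, List.sum_cons, bMeasure, if_neg hk]
    norm_num
    omega

def func_alt (arr : List Int) : List Int :=
  bLoop arr [(0, 0, (arr.length : Int))] []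

-- ===== PRECONDITION & SPEC =====
def Spec_func (arr : List Int) (out : List Int) : Prop := out = func_alt arr
instance (arr : List Int) (out : List Int) : Decidable (Spec_func arr out) := by unfold Spec_func; infer_instance

-- ===== CLAIM (what is proved, stated in full; the proofs are below) =====
def Claim_equal_func : Prop := ∀ (arr : List Int), Dom_func arr → Spec_func arr (func arr)

-- ===== LEMMAS AND PROOFS =====

theorem floordiv3_toNat (l : Int) (h : 0 ≤ l) :
    PySem.Int.floordiv l 3 = ((l.toNat / 3 : Nat) : Int) := by
  obtain ⟨m, rfl⟩ := Int.eq_ofNat_of_zero_le h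
  exact_mod_cast PySem.Int.floordiv_natCast m 3

-- a work item is meaningful for an array of length n
def bValid (n : Nat) (it : Int × Int × Int) : Prop :=
  it.1 ≠ 1 → (0 ≤ it.2.1 ∧ 0 ≤ it.2.2 ∧ it.2.1 + it.2.2 ≤ (n : Int))

-- what fully processing one work item appends
def bDenote (arr : List Int) (it : Int × Int × Int) : List Int :=
  if it.1 = 1 then List.replicate it.2.2.toNat 0
  else func (PySem.List.slice arr (some it.2.1) (some (it.2.1 + it.2.2)))

theorem func_of_short (xs : List Int) (h : xs.length ≤ 1) : func xs = xs := by
  rw [func, if_pos (by exact_mod_cast h : ((xs.length : Int) ≤ 1))]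

theorem func_split (xs : List Int) (h : 2 ≤ xs.length) :
    func xs = func (xs.take (xs.length / 3)) ++ List.replicate (xs.length / 3) 0 ++
      func ((xs.drop (xs.length - xs.length / 3 - 1)).take (xs.length / 3)) := by
  have h3 : PySem.Int.floordiv (xs.length : Int) 3 = ((xs.length / 3 : Nat) : Int) := by
    exact_mod_cast PySem.Int.floordiv_natCast xs.length 3
  rw [func, if_neg (by omega)]
  show func (PySem.List.slice xs (some 0) (some (PySem.Int.floordiv (xs.length : Int) 3))) ++
      List.replicate (PySem.Int.floordiv (xs.length : Int) 3).toNat 0 ++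
      func (PySem.List.slice xs (some (-(PySem.Int.floordiv (xs.length : Int) 3) - 1)) (some (-1)))
      = _
  rw [sliceA_left, sliceA_right xs h, h3]
  norm_num
  omega

theorem bLoop_eq (arr : List Int) (stack : List (Int × Int × Int)) (out : List Int)
    (hv : ∀ it ∈ stack, bValid arr.length it) :
    bLoop arr stack out = out ++ (stack.map (bDenote arr)).flatten := by
  fun_induction bLoop arr stack out with
  | case1 out => simp
  | case2 out s l rest ih =>
    rw [ih (fun it hit => hv it (List.mem_cons_of_mem _ hit))]
    simp [bDenote]
  | case3 out k s l rest hk hl ih =>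
    rw [ih (fun it hit => hv it (List.mem_cons_of_mem _ hit))]
    have hvh := hv (k, s, l) List.mem_cons_self hk
    dsimp only at hvh
    obtain ⟨hs, hl0, hsl⟩ := hvh
    have hshort : (PySem.List.slice arr (some s) (some (s + l))).length ≤ 1 := by
      rw [PySem.List.slice_toNat arr hs (by omega)]
      simp only [List.length_take, List.length_drop]; omega
    simp [bDenote, hk, func_of_short _ hshort]
  | case4 out k s l rest hk hl t ih =>
    have hvh := hv (k, s, l) List.mem_cons_self hk
    dsimp only at hvh
    obtain ⟨hs, hl0, hsl⟩ := hvh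
    have htdef : t = PySem.Int.floordiv l 3 := rfl
    have ht : t = ((l.toNat / 3 : Nat) : Int) := by rw [htdef]; exact floordiv3_toNat l (by omega)
    set S := s.toNat with hS
    set L := l.toNat with hL
    set T := L / 3 with hT
    have hT1 : T + 1 ≤ L := by omega
    have hv' : ∀ it ∈ (((0:Int), s, t) :: ((1:Int), (0:Int), t) ::
        ((0:Int), s + l - t - 1, t) :: rest), bValid arr.length it := by
      intro it hit
      simp only [List.mem_cons] at hit
      rcases hit with rfl | rfl | rfl | hit
      · intro _; dsimp only; refine ⟨hs, by omega, by omega⟩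
      · intro h1; exact absurd rfl h1
      · intro _; dsimp only; refine ⟨by omega, by omega, by omega⟩
      · exact hv it (List.mem_cons_of_mem _ hit)
    rw [ih hv']
    simp only [List.map_cons, List.flatten_cons, ← List.append_assoc]
    congr 1
    have hsub : PySem.List.slice arr (some s) (some (s + l)) = (arr.drop S).take L := by
      rw [PySem.List.slice_toNat arr hs (by omega)]
      congr 1; omega
    have hsublen : ((arr.drop S).take L).length = L := by
      simp only [List.length_take, List.length_drop]; omega
    have hleft : PySem.List.slice arr (some s) (some (s + (T : Int))) =
        (arr.drop S).take T := by
      rw [PySem.List.slice_toNat arr hs (by omega)]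
      congr 1; omega
    have hright : PySem.List.slice arr (some (s + l - (T : Int) - 1))
        (some (s + l - (T : Int) - 1 + (T : Int))) =
        (arr.drop (S + L - T - 1)).take T := by
      rw [PySem.List.slice_toNat arr (by omega) (by omega),
        show (s + l - (T : Int) - 1).toNat = S + L - T - 1 by omega,
        show (s + l - (T : Int) - 1 + (T : Int)).toNat - (S + L - T - 1) = T by omega]
    rw [show bDenote arr (k, s, l) =
        func (PySem.List.slice arr (some s) (some (s + l))) from if_neg hk]
    have hsplit := func_split ((arr.drop S).take L) (by rw [hsublen]; omega)
    rw [hsublen] at hsplit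
    have htake : ((arr.drop S).take L).take (L / 3) = (arr.drop S).take T := by
      rw [List.take_take]; congr 1; omega
    have hdrop : (((arr.drop S).take L).drop (L - L / 3 - 1)).take (L / 3) =
        (arr.drop (S + L - T - 1)).take T := by
      rw [List.drop_take, List.drop_drop, List.take_take,
        show S + (L - L / 3 - 1) = S + L - T - 1 by omega,
        show min (L / 3) (L - (L - L / 3 - 1)) = T by omega]
    rw [hsub, hsplit, htake, hdrop, ht]
    norm_num [bDenote, hleft, hright]
    rw [← hT]

-- ===== VERDICT (by name: the statement is the Claim_ definition above) =====
theorem func_spec : Claim_equal_func := by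
  intro arr _
  unfold Spec_func func_alt
  rw [bLoop_eq arr _ [] ?_]
  · have h0 : PySem.List.slice arr (some 0) (some ((arr.length : Int))) = arr := by
      rw [PySem.List.slice_toNat arr (by omega) (by omega)]
      simp
    simp [bDenote, h0]
  · intro it hit
    simp only [List.mem_cons, List.not_mem_nil, or_false] at hit
    subst hit
    intro _
    simp
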